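-- pv_equiv track=rewrite | github.com/MrTimedying/auditor_helper | src/analysis/analysis_module/chart_manager.py | _get_variable_unit
-- ===== SOURCE A (Python) =====
-- def _get_variable_unit(variable_name: str) -> str:
--     """Get the unit type for a variable based on its name.
--
--     Args:
--         variable_name: Name of the variable
--
--     Returns:
--         Unit type string ('currency', 'percent', 'hours', 'time', etc.)
--     """
--     variable_name_lower = variable_name.lower()
--
--     # Financial variables
--     if any(keyword in variable_name_lower for keyword in ['earnings', 'money', 'revenue', 'profit', 'income', 'cost']):
--         return 'currency'
--
--     # Percentage variables
--     elif any(keyword in variable_name_lower for keyword in ['rate', 'percent', '%', 'ratio']):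
--         return 'percent'
--
--     # Time duration variables
--     elif any(keyword in variable_name_lower for keyword in ['duration', 'time', 'hours', 'minutes']):
--         return 'hours'
--
--     # Time of day variables
--     elif any(keyword in variable_name_lower for keyword in ['claim_time', 'start_time', 'end_time']):
--         return 'time'
--
--     # Default to numeric
--     else:
--         return 'numeric'
-- ===== SOURCE B (Python) =====
-- # Flat keyword->(priority, unit) map scanned exhaustively; the winner is the
-- # matched keyword whose unit has the best (lowest) priority, found with a
-- # min-accumulator.  A's 'time' group is unreachable (each of its keywords
-- # contains 'time', already claimed by the hours group), so it is omitted.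
-- _KEYWORD_UNIT = {
--     'earnings': (0, 'currency'), 'money': (0, 'currency'), 'revenue': (0, 'currency'),
--     'profit': (0, 'currency'), 'income': (0, 'currency'), 'cost': (0, 'currency'),
--     'rate': (1, 'percent'), 'percent': (1, 'percent'), '%': (1, 'percent'),
--     'ratio': (1, 'percent'),
--     'duration': (2, 'hours'), 'time': (2, 'hours'), 'hours': (2, 'hours'),
--     'minutes': (2, 'hours'),
-- }
--
-- def _get_variable_unit(variable_name: str) -> str:
--     name = variable_name.lower()
--     matched = [pu for kw, pu in _KEYWORD_UNIT.items() if kw in name]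
--     best_p, best = 3, 'numeric'
--     for p, unit in matched:
--         if p < best_p:
--             best_p, best = p, unit
--     return best
-- ===== Notes on version B (the rewrite author's own statement) =====
-- stated objective: alternative
-- what changed: Instead of an ordered if/elif chain with early return, B scans a flat keyword->unit map exhaustively, collects all matched units, and picks the one with the minimal priority via a min-accumulator; A's unreachable 'time' group (shadowed by the 'time' keyword of the hours group) is dropped.
import Mathlib
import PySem

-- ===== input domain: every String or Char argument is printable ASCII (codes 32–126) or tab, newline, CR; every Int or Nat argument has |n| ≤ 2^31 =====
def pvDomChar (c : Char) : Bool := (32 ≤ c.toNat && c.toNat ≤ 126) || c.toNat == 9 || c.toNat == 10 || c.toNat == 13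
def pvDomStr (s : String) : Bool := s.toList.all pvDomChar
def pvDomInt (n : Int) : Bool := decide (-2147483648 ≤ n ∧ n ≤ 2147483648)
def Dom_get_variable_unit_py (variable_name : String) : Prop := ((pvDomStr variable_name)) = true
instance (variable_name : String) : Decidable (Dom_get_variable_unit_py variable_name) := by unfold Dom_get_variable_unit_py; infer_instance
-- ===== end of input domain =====

-- B replaces A's early-return if/elif chain by an exhaustive scan of a flat keyword->(priority,unit)
-- map followed by a min-priority accumulator; A's unreachable 'time' group is dropped (alternative, same cost).

-- ===== PORT A =====
def get_variable_unit_py (variable_name : String) : String :=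
  let variable_name_lower := PySem.Str.lower variable_name
  if (["earnings", "money", "revenue", "profit", "income", "cost"]).any
       (fun keyword => PySem.Str.isIn keyword variable_name_lower) then "currency"
  else if (["rate", "percent", "%", "ratio"]).any
       (fun keyword => PySem.Str.isIn keyword variable_name_lower) then "percent"
  else if (["duration", "time", "hours", "minutes"]).any
       (fun keyword => PySem.Str.isIn keyword variable_name_lower) then "hours"
  else if (["claim_time", "start_time", "end_time"]).any
       (fun keyword => PySem.Str.isIn keyword variable_name_lower) then "time"
  else "numeric"

-- ===== PORT B =====
-- the dict _KEYWORD_UNIT as an association list (insertion order)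
def guKeywordUnit : List (String × (Nat × String)) :=
  [ ("earnings", (0, "currency")), ("money", (0, "currency")), ("revenue", (0, "currency")),
    ("profit", (0, "currency")), ("income", (0, "currency")), ("cost", (0, "currency")),
    ("rate", (1, "percent")), ("percent", (1, "percent")), ("%", (1, "percent")),
    ("ratio", (1, "percent")),
    ("duration", (2, "hours")), ("time", (2, "hours")), ("hours", (2, "hours")),
    ("minutes", (2, "hours")) ]

-- one step of the min-accumulator loop: `if p < best_p: best_p, best = p, unit`
def guBestStep (acc pu : Nat × String) : Nat × String :=
  if pu.1 < acc.1 then pu else acc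

def get_variable_unit_py_alt (variable_name : String) : String :=
  let name := PySem.Str.lower variable_name
  let matched := (guKeywordUnit.filter (fun kv => PySem.Str.isIn kv.1 name)).map Prod.snd
  (matched.foldl guBestStep (3, "numeric")).2

-- ===== PRECONDITION & SPEC =====
def Spec_get_variable_unit_py (variable_name : String) (out : String) : Prop := out = get_variable_unit_py_alt variable_name
instance (variable_name : String) (out : String) : Decidable (Spec_get_variable_unit_py variable_name out) := by unfold Spec_get_variable_unit_py; infer_instance

-- ===== CLAIM (what is proved, stated in full; the proofs are below) =====
def Claim_equal_get_variable_unit_py : Prop := ∀ (variable_name : String), Dom_get_variable_unit_py variable_name → Spec_get_variable_unit_py variable_name (get_variable_unit_py variable_name)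

-- ===== LEMMAS AND PROOFS =====

-- folding the min-accumulator over a list all of whose elements are (p, u)
theorem gu_foldl_const (p : Nat) (u : String) :
    ∀ (l : List (Nat × String)) (acc : Nat × String), (∀ x ∈ l, x = (p, u)) →
      l.foldl guBestStep acc = if l.isEmpty then acc else if p < acc.1 then (p, u) else acc := by
  intro l
  induction l with
  | nil => intro acc _; simp
  | cons a t ih =>
      intro acc h
      have ha : a = (p, u) := h a (List.mem_cons_self ..)
      have ht : ∀ x ∈ t, x = (p, u) := fun x hx => h x (List.mem_cons_of_mem _ hx)
      subst ha
      have hstep : guBestStep acc (p, u) = if p < acc.1 then (p, u) else acc := rfl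
      simp only [List.foldl_cons, ih _ ht, hstep, List.isEmpty_cons]
      split_ifs <;> simp_all

-- emptiness of a filtered-then-mapped list vs `any`
theorem gu_isEmpty_matched {α β : Type} (p : α → Bool) (f : α → β) (g : List α) :
    ((g.filter p).map f).isEmpty = !(g.any p) := by
  induction g with
  | nil => rfl
  | cons a t ih => cases h : p a <;> simp [h, ih]

-- a keyword containing 'time' cannot occur in n if 'time' does not
theorem gu_time_shadow (n : String) (kw : String)
    (hsub : ("time".toList) <:+: kw.toList)
    (h : PySem.Str.isIn "time" n = false) : PySem.Str.isIn kw n = false := by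
  cases hc : PySem.Str.isIn kw n
  · rfl
  · have h1 : kw.toList <:+: n.toList := (PySem.Str.isIn_iff_infix kw n).mp hc
    have h2 : ("time".toList) <:+: n.toList := hsub.trans h1
    have := (PySem.Str.isIn_iff_infix "time" n).mpr h2
    rw [this] at h
    exact absurd h (by simp)

-- every element of the matched sublist of a constant-valued group is that value
theorem gu_mem_matched (n : String) (g : List (String × (Nat × String))) (p : Nat) (u : String)
    (hg : ∀ kv ∈ g, kv.2 = (p, u)) :
    ∀ x ∈ (g.filter (fun kv => PySem.Str.isIn kv.1 n)).map Prod.snd, x = (p, u) := by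
  intro x hx
  simp only [List.mem_map, List.mem_filter] at hx
  obtain ⟨a, ⟨ha, _⟩, rfl⟩ := hx
  exact hg a ha

-- the whole equivalence, stated on the already-lowered name
theorem gu_main (n : String) :
    (if (["earnings", "money", "revenue", "profit", "income", "cost"]).any
         (fun keyword => PySem.Str.isIn keyword n) then "currency"
     else if (["rate", "percent", "%", "ratio"]).any
         (fun keyword => PySem.Str.isIn keyword n) then "percent"
     else if (["duration", "time", "hours", "minutes"]).any
         (fun keyword => PySem.Str.isIn keyword n) then "hours"
     else if (["claim_time", "start_time", "end_time"]).any
         (fun keyword => PySem.Str.isIn keyword n) then "time"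
     else "numeric")
    = (((guKeywordUnit.filter (fun kv => PySem.Str.isIn kv.1 n)).map Prod.snd).foldl
         guBestStep (3, "numeric")).2 := by
  -- split the table into its three constant-valued groups
  have hsplit : guKeywordUnit =
      ([ ("earnings", ((0 : Nat), "currency")), ("money", (0, "currency")), ("revenue", (0, "currency")),
         ("profit", (0, "currency")), ("income", (0, "currency")), ("cost", (0, "currency")) ]
       ++ [ ("rate", ((1 : Nat), "percent")), ("percent", (1, "percent")), ("%", (1, "percent")),
            ("ratio", (1, "percent")) ])
       ++ [ ("duration", ((2 : Nat), "hours")), ("time", (2, "hours")), ("hours", (2, "hours")),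
            ("minutes", (2, "hours")) ] := rfl
  rw [hsplit, List.filter_append, List.filter_append, List.map_append, List.map_append,
      List.foldl_append, List.foldl_append]
  -- evaluate the three constant-group folds (outermost first) and the emptiness tests
  rw [gu_foldl_const 2 "hours" _ _ (gu_mem_matched n _ 2 "hours" (by decide))]
  rw [gu_foldl_const 1 "percent" _ _ (gu_mem_matched n _ 1 "percent" (by decide))]
  rw [gu_foldl_const 0 "currency" _ _ (gu_mem_matched n _ 0 "currency" (by decide))]
  rw [gu_isEmpty_matched, gu_isEmpty_matched, gu_isEmpty_matched]
  -- the pairwise `any`s are definitionally the keyword-list `any`s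
  have e0 : ([ ("earnings", ((0 : Nat), "currency")), ("money", (0, "currency")), ("revenue", (0, "currency")),
      ("profit", (0, "currency")), ("income", (0, "currency")), ("cost", (0, "currency")) ].any
      (fun kv => PySem.Str.isIn kv.1 n))
      = (["earnings", "money", "revenue", "profit", "income", "cost"]).any
          (fun keyword => PySem.Str.isIn keyword n) := rfl
  have e1 : ([ ("rate", ((1 : Nat), "percent")), ("percent", (1, "percent")), ("%", (1, "percent")),
      ("ratio", (1, "percent")) ].any (fun kv => PySem.Str.isIn kv.1 n))
      = (["rate", "percent", "%", "ratio"]).any (fun keyword => PySem.Str.isIn keyword n) := rfl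
  have e2 : ([ ("duration", ((2 : Nat), "hours")), ("time", (2, "hours")), ("hours", (2, "hours")),
      ("minutes", (2, "hours")) ].any (fun kv => PySem.Str.isIn kv.1 n))
      = (["duration", "time", "hours", "minutes"]).any (fun keyword => PySem.Str.isIn keyword n) := rfl
  rw [e0, e1, e2]
  -- the time-of-day keywords are shadowed by 'time' in the hours group
  have hsh : (["claim_time", "start_time", "end_time"]).any (fun keyword => PySem.Str.isIn keyword n) = true →
      (["duration", "time", "hours", "minutes"]).any (fun keyword => PySem.Str.isIn keyword n) = true := by
    have s : ∀ kw : String, ("time".toList) <:+: kw.toList → PySem.Str.isIn kw n = true →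
        PySem.Str.isIn "time" n = true := by
      intro kw hsub h
      cases ht : PySem.Str.isIn "time" n
      · rw [gu_time_shadow n kw hsub ht] at h; exact absurd h (by simp)
      · rfl
    intro h
    simp only [List.any_cons, List.any_nil, Bool.or_eq_true] at h ⊢
    rcases h with h | h | h | h
    · exact Or.inr (Or.inl (s "claim_time" (by decide) h))
    · exact Or.inr (Or.inl (s "start_time" (by decide) h))
    · exact Or.inr (Or.inl (s "end_time" (by decide) h))
    · exact absurd h (by simp)
  -- abstract the four group booleans and do the finite case analysis
  generalize hb3 : (["claim_time", "start_time", "end_time"]).any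
      (fun keyword => PySem.Str.isIn keyword n) = b3 at hsh ⊢
  generalize hb2 : (["duration", "time", "hours", "minutes"]).any
      (fun keyword => PySem.Str.isIn keyword n) = b2 at hsh ⊢
  generalize hb1 : (["rate", "percent", "%", "ratio"]).any
      (fun keyword => PySem.Str.isIn keyword n) = b1 at ⊢
  generalize hb0 : (["earnings", "money", "revenue", "profit", "income", "cost"]).any
      (fun keyword => PySem.Str.isIn keyword n) = b0 at ⊢
  cases b0 <;> cases b1 <;> cases b2 <;> cases b3 <;> simp_all

-- ===== VERDICT (by name: the statement is the Claim_ definition above) =====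
theorem get_variable_unit_py_spec : Claim_equal_get_variable_unit_py := by
  intro v _
  show get_variable_unit_py v = get_variable_unit_py_alt v
  simp only [get_variable_unit_py, get_variable_unit_py_alt]
  exact gu_main (PySem.Str.lower v)
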